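-- pv_equiv track=rewrite | github.com/kaiokot/code-puzzles | codegolf/english_to_alien/main.py | to_alien
-- ===== SOURCE A (Python) =====
-- def to_alien(name):
-- 	alien_vowels = {"a":"obo","e":"unu","i":"ini","o":"api","u":"iki"}
-- 	out = ''
-- 	for ch in name:
-- 		if ch.lower() in alien_vowels:
-- 			out +=   ch.replace(ch,alien_vowels[ch.lower()].capitalize() if ch.istitle() else alien_vowels[ch.lower()])
-- 		else:
-- 			out += ch
--
-- 	return out
-- ===== SOURCE B (Python) =====
-- # Idiomatic rewrite: the per-character case branch of A is folded into one
-- # static 10-entry translation table built once; the loop is delegated to str.translate.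
-- _ALIEN = str.maketrans({"a": "obo", "e": "unu", "i": "ini", "o": "api", "u": "iki",
--                         "A": "Obo", "E": "Unu", "I": "Ini", "O": "Api", "U": "Iki"})
--
-- def to_alien(name):
--     return name.translate(_ALIEN)
-- ===== Notes on version B (the rewrite author's own statement) =====
-- stated objective: idiomatic
-- what changed: A's per-character lower/istitle case branch and dict lookup inside an accumulation loop are folded into one static 10-entry translation table (lowercase and capitalized syllables precomputed) applied with str.translate, a single C-level pass.
import Mathlib
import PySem

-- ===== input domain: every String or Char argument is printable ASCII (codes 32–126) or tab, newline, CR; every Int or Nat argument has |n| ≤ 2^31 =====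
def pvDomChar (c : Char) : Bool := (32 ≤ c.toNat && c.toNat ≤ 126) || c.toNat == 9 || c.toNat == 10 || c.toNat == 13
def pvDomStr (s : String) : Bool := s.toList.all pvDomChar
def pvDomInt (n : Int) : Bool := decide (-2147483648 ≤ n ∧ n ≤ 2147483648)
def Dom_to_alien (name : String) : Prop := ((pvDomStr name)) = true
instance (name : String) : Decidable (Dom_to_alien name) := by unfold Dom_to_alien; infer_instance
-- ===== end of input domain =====

-- B folds A's per-character case branch into one static 10-entry translation table applied in a single pass (idiomatic).


-- ===== PORT A =====
def alienVowels : PySem.Dict String String :=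
  PySem.Dict.ofList [("a","obo"),("e","unu"),("i","ini"),("o","api"),("u","iki")]

-- str.capitalize: first char uppercased, rest lowercased (exact on ASCII, the only use here)
def pyCapitalize (s : String) : String :=
  match s.toList with
  | [] => ""
  | c :: rest => String.ofList (PySem.Chars.upperChar c :: PySem.Chars.lower rest)

-- the string A's loop body appends for one char ch; ch.istitle() for a single ASCII char is
-- exactly isupper, and ch.replace(ch, x) is ported literally via PySem.Str.replace
def pieceA (ch : Char) : String :=
  let lch := PySem.Str.lower (String.singleton ch)
  if alienVowels.contains lch then
    PySem.Str.replace (String.singleton ch) (String.singleton ch)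
      (if PySem.Chars.isupper ch then pyCapitalize (alienVowels.getD lch "")
       else alienVowels.getD lch "")
  else String.singleton ch

-- per-iteration body of A's loop: out += piece
def toAlienStep (out : String) (ch : Char) : String := out ++ pieceA ch

def to_alien (name : String) : String :=
  name.toList.foldl toAlienStep ""

-- ===== PORT B =====
def alienTable : List (Char × String) :=
  [('a',"obo"),('e',"unu"),('i',"ini"),('o',"api"),('u',"iki"),
   ('A',"Obo"),('E',"Unu"),('I',"Ini"),('O',"Api"),('U',"Iki")]

-- str.translate with a char→str table: map each char through the table (identity on misses) and concatenate
def to_alien_alt (name : String) : String :=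
  String.join (name.toList.map (fun c => (alienTable.lookup c).getD (String.singleton c)))

-- ===== PRECONDITION & SPEC =====
def Spec_to_alien (name : String) (out : String) : Prop := out = to_alien_alt name
instance (name : String) (out : String) : Decidable (Spec_to_alien name out) := by unfold Spec_to_alien; infer_instance

-- ===== CLAIM (what is proved, stated in full; the proofs are below) =====
def Claim_equal_to_alien : Prop := ∀ (name : String), Dom_to_alien name → Spec_to_alien name (to_alien name)

-- ===== LEMMAS AND PROOFS =====

theorem foldl_append_pull (l : List String) (a b : String) :
    List.foldl (fun r s => r ++ s) (a ++ b) l = a ++ List.foldl (fun r s => r ++ s) b l := by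
  induction l generalizing b with
  | nil => rfl
  | cons x t ih => simpa [String.append_assoc] using ih (b ++ x)

theorem join_cons (x : String) (l : List String) :
    String.join (x :: l) = x ++ String.join l := by
  simp only [String.join, List.foldl_cons]
  rw [show ("" ++ x : String) = x ++ "" by simp, foldl_append_pull]

theorem foldl_step (l : List Char) (acc : String) :
    l.foldl toAlienStep acc = acc ++ String.join (l.map pieceA) := by
  induction l generalizing acc with
  | nil => simp [String.join]
  | cons c t ih =>
    simp only [List.foldl_cons, List.map_cons, toAlienStep]
    rw [ih, join_cons, String.append_assoc]

set_option maxRecDepth 20000 in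
set_option maxHeartbeats 2000000 in
theorem piece_eq_of_dom (c : Char) (h : pvDomChar c = true) :
    pieceA c = (alienTable.lookup c).getD (String.singleton c) := by
  have hb : c.toNat < 127 := by
    simp only [pvDomChar, Bool.or_eq_true, Bool.and_eq_true, decide_eq_true_eq, beq_iff_eq] at h
    omega
  have hc : c = Char.ofNat c.toNat := (Char.ofNat_toNat c).symm
  rw [hc]
  have key : ∀ i : Fin 127,
      pieceA (Char.ofNat i.val) =
        (alienTable.lookup (Char.ofNat i.val)).getD (String.singleton (Char.ofNat i.val)) := by
    decide
  exact key ⟨c.toNat, hb⟩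

-- ===== VERDICT (by name: the statement is the Claim_ definition above) =====
theorem to_alien_spec : Claim_equal_to_alien := by
  intro name hdom
  unfold Spec_to_alien to_alien to_alien_alt
  rw [foldl_step]
  have hall : ∀ c ∈ name.toList, pvDomChar c = true := by
    simpa [Dom_to_alien, pvDomStr, List.all_eq_true] using hdom
  have : name.toList.map pieceA
      = name.toList.map (fun c => (alienTable.lookup c).getD (String.singleton c)) :=
    List.map_congr_left (fun c hc => piece_eq_of_dom c (hall c hc))
  rw [this]
  simp
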